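-- pv_equiv track=rewrite | github.com/cloudsecuritygroup/ers | ers/structures/range_tree.py | __satisfies_urc_condition
-- ===== SOURCE A (Python) =====
-- def __satisfies_urc_condition(results) -> bool:
--     seen_levels = set()
--     max_level = 0
--     for result in results:
--         if result[0] > max_level:
--             max_level = result[0]
--         seen_levels.add(result[0])
--
--     for lvl in range(0, max_level + 1):
--         if lvl not in seen_levels:
--             return False
--     return True
-- ===== SOURCE B (Python) =====
-- def __satisfies_urc_condition(results) -> bool:
--     seen = {r[0] for r in results}
--     max_level = max(seen | {0})
--     return sum(0 <= x <= max_level for x in seen) == max_level + 1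
-- ===== Notes on version B (the rewrite author's own statement) =====
-- stated objective: alternative
-- what changed: Replaces A's two explicit loops (running max + early-returning scan over range(0, max+1)) with a set comprehension over the levels, max(seen | {0}), and a pigeonhole counting test: all of 0..max are present iff the duplicate-free set contains exactly max+1 elements of [0, max].
import Mathlib
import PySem

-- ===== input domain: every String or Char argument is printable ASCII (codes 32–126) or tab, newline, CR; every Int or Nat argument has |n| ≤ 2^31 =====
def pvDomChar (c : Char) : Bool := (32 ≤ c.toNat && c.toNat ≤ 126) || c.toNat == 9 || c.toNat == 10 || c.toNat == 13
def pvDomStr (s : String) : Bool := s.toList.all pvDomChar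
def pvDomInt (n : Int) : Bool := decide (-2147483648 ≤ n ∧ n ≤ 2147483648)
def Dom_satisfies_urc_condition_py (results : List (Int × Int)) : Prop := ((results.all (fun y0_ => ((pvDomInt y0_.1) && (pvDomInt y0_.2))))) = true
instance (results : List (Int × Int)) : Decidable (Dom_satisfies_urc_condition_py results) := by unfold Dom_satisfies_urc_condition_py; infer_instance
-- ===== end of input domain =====

-- B replaces A's two explicit loops by a set comprehension, max(seen | {0}) and a counting test
-- completeness test (all of 0..max present iff the set holds max+1 elements of [0, max]).

-- ===== PORT A =====
-- Python A's second loop, 'for lvl in range(0, max_level+1): if lvl not in seen_levels: return False'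
-- then 'return True'; range() is lazy and the loop early-returns, so it recurses on the counter.
def pyA_check (lvl stop : Int) (seen : PySem.Set Int) : Bool :=
  if _h : lvl < stop then
    if !PySem.Set.contains seen lvl then false else pyA_check (lvl + 1) stop seen
  else true
termination_by (stop - lvl).toNat
decreasing_by omega

def satisfies_urc_condition_py (results : List (Int × Int)) : Bool :=
  -- first loop: running (seen_levels, max_level) over results
  let st := results.foldl
    (fun (acc : PySem.Set Int × Int) result =>
      (PySem.Set.add acc.1 result.1, if result.1 > acc.2 then result.1 else acc.2))
    (PySem.Set.empty, 0)
  pyA_check 0 (st.2 + 1) st.1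

-- ===== PORT B =====
def satisfies_urc_condition_py_alt (results : List (Int × Int)) : Bool :=
  let seen : PySem.Set Int := PySem.Set.ofList (results.map (·.1))
  -- max(seen | {0}); the union is nonempty so Python's max never raises — .getD 0 is unreachable
  let maxLevel : Int := (PySem.List.max? (PySem.Set.union seen (PySem.Set.ofList [0])) (fun x => x)).getD 0
  -- sum(0 <= x <= max_level for x in seen) == max_level + 1  (sum is order-insensitive over the set)
  let cnt : Int := seen.foldl (fun acc x => if (0 ≤ x && x ≤ maxLevel) then acc + 1 else acc) 0
  decide (cnt = maxLevel + 1)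

-- ===== PRECONDITION & SPEC =====
def Spec_satisfies_urc_condition_py (results : List (Int × Int)) (out : Bool) : Prop := out = satisfies_urc_condition_py_alt results
instance (results : List (Int × Int)) (out : Bool) : Decidable (Spec_satisfies_urc_condition_py results out) := by unfold Spec_satisfies_urc_condition_py; infer_instance

-- ===== CLAIM (what is proved, stated in full; the proofs are below) =====
def Claim_equal_satisfies_urc_condition_py : Prop := ∀ (results : List (Int × Int)), Dom_satisfies_urc_condition_py results → Spec_satisfies_urc_condition_py results (satisfies_urc_condition_py results)

-- ===== LEMMAS AND PROOFS =====

-- A's fold's set component is set(firsts), its max component is the running max clamped at 0.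
lemma pyA_fold_eq (results : List (Int × Int)) (s : PySem.Set Int) (m : Int) :
    results.foldl
      (fun (acc : PySem.Set Int × Int) result =>
        (PySem.Set.add acc.1 result.1, if result.1 > acc.2 then result.1 else acc.2))
      (s, m)
    = (PySem.Set.update s (results.map (·.1)), (results.map (·.1)).foldl max m) := by
  induction results generalizing s m with
  | nil => simp [PySem.Set.update]
  | cons r rest ih =>
      simp only [List.foldl_cons, List.map_cons, ih, PySem.Set.update_cons]
      congr 1
      by_cases h : r.1 > m
      · simp [h, le_of_lt h]
      · have : max m r.1 = m := by omega
        simp [h, this]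

-- A's lazy scan succeeds iff every level in [lvl, stop) is in seen
lemma pyA_check_iff (lvl stop : Int) (seen : PySem.Set Int) :
    pyA_check lvl stop seen = true ↔ ∀ x, lvl ≤ x → x < stop → x ∈ seen := by
  rw [pyA_check]
  by_cases h : lvl < stop
  · rw [dif_pos h]
    cases hc : PySem.Set.contains seen lvl with
    | false =>
        simp only [Bool.not_false, if_true]
        constructor
        · intro hfalse; cases hfalse
        · intro hall
          have := (PySem.Set.contains_iff seen lvl).2 (hall lvl le_rfl h)
          rw [hc] at this; cases this
    | true =>
        simp only [Bool.not_true, Bool.false_eq_true, if_false]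
        rw [pyA_check_iff (lvl + 1) stop seen]
        constructor
        · intro hall x hx1 hx2
          rcases eq_or_lt_of_le hx1 with heq | hlt
          · rw [← heq]; exact (PySem.Set.contains_iff seen lvl).1 hc
          · exact hall x (by omega) hx2
        · intro hall x hx1 hx2; exact hall x (by omega) hx2
  · rw [dif_neg h]
    constructor
    · intro _ x hx1 hx2; omega
    · intro _; rfl
termination_by (stop - lvl).toNat
decreasing_by omega

lemma max?_union_eq (xs : List Int) :
    PySem.List.max? (PySem.Set.union (PySem.Set.ofList xs) (PySem.Set.ofList [0])) (fun x => x)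
      = some (xs.foldl max 0) := by
  set u := PySem.Set.union (PySem.Set.ofList xs) (PySem.Set.ofList [0]) with hu
  have hmem_u : ∀ y, y ∈ u ↔ y ∈ xs ∨ y = 0 := by
    intro y
    simp [hu, PySem.Set.mem_union, PySem.Set.mem_ofList]
  have hc_mem : xs.foldl max 0 ∈ u := by
    have h0 := PySem.List.max?_mem (PySem.List.max?_id_cons (0 : Int) xs)
    rcases List.mem_cons.mp h0 with h | h
    · exact (hmem_u _).2 (Or.inr h)
    · exact (hmem_u _).2 (Or.inl h)
  have hc_ub : ∀ y ∈ u, y ≤ xs.foldl max 0 := by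
    intro y hy
    rcases (hmem_u y).1 hy with h | h
    · exact (PySem.List.le_foldl_max xs 0).2 y h
    · subst h; exact (PySem.List.le_foldl_max xs 0).1
  have hne : u ≠ [] := by
    intro h
    have := hc_mem
    simp [h] at this
  obtain ⟨v, hv⟩ : ∃ v, PySem.List.max? u (fun x => x) = some v := by
    cases hmax : PySem.List.max? u (fun x => x) with
    | none => exact absurd ((PySem.List.max?_eq_none_iff u (fun x => x)).mp hmax) hne
    | some v => exact ⟨v, rfl⟩
  have hv_mem : v ∈ u := PySem.List.max?_mem hv
  have hv_ub : ∀ y ∈ u, y ≤ v := PySem.List.max?_isMax hv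
  have : v = xs.foldl max 0 :=
    le_antisymm (hc_ub v hv_mem) (hv_ub _ hc_mem)
  rw [hv, this]

-- the pigeonhole step: a duplicate-free list holds (m+1) elements of [0, m] iff it holds all of them
lemma count_interval_iff (s : List Int) (hnd : s.Nodup) (m : Int) (hm : 0 ≤ m) :
    ((s.countP (fun x => 0 ≤ x && x ≤ m) : Int) = m + 1) ↔ ∀ x, 0 ≤ x → x ≤ m → x ∈ s := by
  classical
  set F := s.toFinset.filter (fun x => 0 ≤ x ∧ x ≤ m) with hF
  have hsub : F ⊆ Finset.Icc 0 m := by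
    intro x hx
    rw [hF, Finset.mem_filter] at hx
    exact Finset.mem_Icc.2 hx.2
  have hcount : s.countP (fun x => 0 ≤ x && x ≤ m) = F.card := by
    rw [hF, List.countP_eq_length_filter]
    have : s.toFinset.filter (fun x => 0 ≤ x ∧ x ≤ m)
        = (s.filter (fun x => 0 ≤ x && x ≤ m)).toFinset := by
      ext x
      simp [Finset.mem_filter, List.mem_toFinset, and_comm]
    rw [this, List.toFinset_card_of_nodup (hnd.filter _)]
  have hicc : (Finset.Icc (0:Int) m).card = (m + 1).toNat := by
    rw [Int.card_Icc]; omega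
  constructor
  · intro hcnt x hx1 hx2
    have hcard : (Finset.Icc 0 m).card ≤ F.card := by
      rw [hicc, ← hcount]; omega
    have := Finset.eq_of_subset_of_card_le hsub hcard
    have hx : x ∈ F := this ▸ Finset.mem_Icc.2 ⟨hx1, hx2⟩
    rw [hF, Finset.mem_filter, List.mem_toFinset] at hx
    exact hx.1
  · intro hall
    have : F = Finset.Icc 0 m := by
      apply Finset.Subset.antisymm hsub
      intro x hx
      rw [Finset.mem_Icc] at hx
      rw [hF, Finset.mem_filter, List.mem_toFinset]
      exact ⟨hall x hx.1 hx.2, hx⟩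
    rw [hcount, this, hicc]; omega

-- ===== VERDICT (by name: the statement is the Claim_ definition above) =====
theorem satisfies_urc_condition_py_spec : Claim_equal_satisfies_urc_condition_py := by
  intro results _
  unfold Spec_satisfies_urc_condition_py satisfies_urc_condition_py satisfies_urc_condition_py_alt
  simp only [pyA_fold_eq, PySem.Set.update_empty, max?_union_eq, Option.getD_some,
    PySem.List.foldl_count_if]
  set firsts := results.map (·.1) with hf
  set m := firsts.foldl max 0 with hmval
  have hm : 0 ≤ m := (PySem.List.le_foldl_max firsts 0).1
  rw [Bool.eq_iff_iff, pyA_check_iff, decide_eq_true_iff, Int.zero_add,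
    count_interval_iff _ (PySem.Set.nodup_ofList firsts) m hm]
  constructor
  · intro h x hx1 hx2; exact h x hx1 (by omega)
  · intro h x hx1 hx2; exact h x hx1 (by omega)
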